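-- pv_equiv track=rewrite | github.com/Koozco/pmp | approval_wip/src/aaa_pb/legacy_rules/rule_private.py | kborda_score
-- ===== SOURCE A (Python) =====
-- def kborda_score(V, W):
--     m = len(V[0])
--     s = 0
--     for v in V:
--         for i in range(m):
--             if (v[i] in W):
--                 s += m - i - 1
--     return s
-- ===== SOURCE B (Python) =====
-- def kborda_score(V, W):
--     m = len(V[0])
--     winners = set(W)
--     total = 0
--     for v in V:
--         scoremap = {}
--         for i, c in enumerate(v[:m]):
--             scoremap[c] = scoremap.get(c, 0) + (m - 1 - i)
--         for c in winners:
--             total += scoremap.get(c, 0)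
--     return total
-- ===== Notes on version B (the rewrite author's own statement) =====
-- stated objective: alternative
-- what changed: Instead of testing every ballot position against W inline, B builds a per-voter positional-score dict in one pass and then reads off the scores of the de-duplicated winner set.
import Mathlib
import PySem

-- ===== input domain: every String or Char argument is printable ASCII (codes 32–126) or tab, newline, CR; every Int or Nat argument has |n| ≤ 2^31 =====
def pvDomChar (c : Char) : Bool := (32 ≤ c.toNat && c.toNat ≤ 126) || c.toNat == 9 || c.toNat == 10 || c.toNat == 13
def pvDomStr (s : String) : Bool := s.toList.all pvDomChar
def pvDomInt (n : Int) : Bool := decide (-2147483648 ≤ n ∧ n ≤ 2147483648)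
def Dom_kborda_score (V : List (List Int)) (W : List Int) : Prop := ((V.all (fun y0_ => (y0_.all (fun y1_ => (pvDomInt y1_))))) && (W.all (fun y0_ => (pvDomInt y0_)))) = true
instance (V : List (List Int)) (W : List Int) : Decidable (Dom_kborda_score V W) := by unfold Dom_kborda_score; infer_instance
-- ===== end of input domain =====

-- B replaces A's inline per-position membership test by a per-voter positional-score
-- dict queried over the de-duplicated winner set (alternative decomposition, same cost class).


-- ===== PORT A =====
def kborda_score (V : List (List Int)) (W : List Int) : Int :=
  let m : Nat := (PySem.List.pyGetD V 0 []).length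
  V.foldl (fun s v =>
    (PySem.List.pyRange 0 (m : Int) 1).foldl (fun s i =>
      if W.contains (PySem.List.pyGetD v i 0) then s + ((m : Int) - i - 1) else s) s) 0

-- ===== PORT B =====
def kborda_score_alt (V : List (List Int)) (W : List Int) : Int :=
  let m : Nat := (PySem.List.pyGetD V 0 []).length
  let winners : PySem.Set Int := PySem.Set.ofList W
  V.foldl (fun total v =>
    let scoremap : PySem.Dict Int Int :=
      (PySem.List.enumerate (PySem.List.slice v none (some (m : Int)))).foldl
        (fun d p => d.modify p.2 0 (fun y => y + ((m : Int) - 1 - p.1))) PySem.Dict.empty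
    winners.foldl (fun t c => t + scoremap.getD c 0) total) 0

-- ===== PRECONDITION & SPEC =====
-- Pre_ excludes exactly the inputs where A raises IndexError: empty V (len(V[0])),
-- and ballots shorter than the first ballot (v[i] out of range).
def Pre_kborda_score (V : List (List Int)) (W : List Int) : Prop :=
  V ≠ [] ∧ ∀ v ∈ V, (V.headD []).length ≤ v.length
instance (V : List (List Int)) (W : List Int) : Decidable (Pre_kborda_score V W) := by
  unfold Pre_kborda_score; infer_instance
def pvWitness_kborda_score : List (List Int) × List Int := ([[1, 2], [2, 1]], [1])

def Spec_kborda_score (V : List (List Int)) (W : List Int) (out : Int) : Prop := out = kborda_score_alt V W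
instance (V : List (List Int)) (W : List Int) (out : Int) : Decidable (Spec_kborda_score V W out) := by unfold Spec_kborda_score; infer_instance

-- ===== CLAIM (what is proved, stated in full; the proofs are below) =====
def Claim_equal_kborda_score : Prop := ∀ (V : List (List Int)) (W : List Int), Dom_kborda_score V W → Pre_kborda_score V W → Spec_kborda_score V W (kborda_score V W)
-- ===== LEMMAS AND PROOFS =====

-- sum over a duplicate-free list of a pointwise update at x
lemma pv_sum_map_update (S : List Int) (hS : S.Nodup) (g : Int → Int) (x w : Int) :
    (S.map (fun c => if c = x then g c + w else g c)).sum
      = (S.map g).sum + (if x ∈ S then w else 0) := by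
  induction S with
  | nil => simp
  | cons a S ih =>
    rcases List.nodup_cons.mp hS with ⟨ha, hS'⟩
    simp only [List.map_cons, List.sum_cons]
    by_cases hax : a = x
    · subst hax
      rw [if_pos rfl]
      have hmap : S.map (fun c => if c = a then g c + w else g c) = S.map g := by
        apply List.map_congr_left
        intro c hc
        exact if_neg (fun h => ha (by rw [← h]; exact hc))
      rw [hmap, if_pos (List.mem_cons_self)]
      ring
    · have hxa : ¬ x = a := fun h => hax h.symm
      rw [if_neg hax, ih hS',
        if_congr (Iff.intro (fun hm => (List.mem_cons.mp hm).resolve_left hxa)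
          (fun hm => List.mem_cons_of_mem a hm)) rfl (rfl : (0:Int) = 0)]
      ring

-- reading the accumulated dict over a duplicate-free set S
lemma pv_dict_sum (l : List (Int × Int)) (S : List Int) (hS : S.Nodup)
    (wt : Int × Int → Int) (d0 : PySem.Dict Int Int) :
    (S.map (fun c => (l.foldl (fun d p => d.modify p.2 0 (fun y => y + wt p)) d0).getD c 0)).sum
      = (S.map (fun c => d0.getD c 0)).sum
        + (l.map (fun p => if p.2 ∈ S then wt p else 0)).sum := by
  induction l generalizing d0 with
  | nil => simp
  | cons p l ih =>
    simp only [List.foldl_cons, List.map_cons, List.sum_cons]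
    rw [ih]
    have hmap : S.map (fun c => (d0.modify p.2 0 (fun y => y + wt p)).getD c 0)
        = S.map (fun c => if c = p.2 then d0.getD c 0 + wt p else d0.getD c 0) := by
      apply List.map_congr_left
      intro c _
      rw [PySem.Dict.getD_modify]
      by_cases h : c = p.2
      · simp [h]
      · simp [h]
    rw [hmap, pv_sum_map_update S hS (fun c => d0.getD c 0) p.2 (wt p)]
    ring

-- the per-voter equality: A's positional scan = B's tally-then-read
lemma pv_inner_eq (W : List Int) (m : Nat) (v : List Int) (hv : m ≤ v.length) (s : Int) :
    (PySem.List.pyRange 0 (m : Int) 1).foldl (fun s i =>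
        if W.contains (PySem.List.pyGetD v i 0) then s + ((m : Int) - i - 1) else s) s
      = (PySem.Set.ofList W).foldl (fun t c =>
          t + ((PySem.List.enumerate (PySem.List.slice v none (some (m : Int)))).foldl
                (fun d p => d.modify p.2 0 (fun y => y + ((m : Int) - 1 - p.1))) PySem.Dict.empty).getD c 0) s := by
  have hslice : PySem.List.slice v none (some (m : Int)) = v.take m :=
    PySem.List.slice_to_natCast v m
  have hlen : (v.take m).length = m := by simp [hv]
  -- A side: index loop rewritten as a loop over enumerate (v.take m)
  have hA : (PySem.List.pyRange 0 (m : Int) 1).foldl (fun s i =>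
        if W.contains (PySem.List.pyGetD v i 0) then s + ((m : Int) - i - 1) else s) s
      = (PySem.List.enumerate (v.take m)).foldl (fun s p =>
        if W.contains p.2 then s + ((m : Int) - p.1 - 1) else s) s := by
    rw [PySem.List.enumerate_eq_map_pyRange (v.take m) 0, List.foldl_map]
    have hm : PySem.List.len (v.take m) = (m : Int) := by
      simp [PySem.List.len_eq, hlen]
    rw [hm]
    apply PySem.List.foldl_congr_mem
    intro acc i hi
    have hi' := PySem.List.mem_pyRange_one.mp hi
    have h0 : PySem.List.pyGetD v i 0 = PySem.List.pyGetD (v.take m) i 0 := by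
      rw [PySem.List.pyGetD_of_nonneg v 0 hi'.1, PySem.List.pyGetD_of_nonneg (v.take m) 0 hi'.1]
      have hlt : i.toNat < m := by omega
      simp [List.getD_eq_getElem?_getD, List.getElem?_take_of_lt hlt]
    rw [h0]
  rw [hA, hslice]
  -- both sides become s + a sum, and the two sums agree
  rw [PySem.List.foldl_add (PySem.Set.ofList W)
    (fun c => ((PySem.List.enumerate (v.take m)).foldl
      (fun d p => d.modify p.2 0 (fun y => y + ((m : Int) - 1 - p.1))) PySem.Dict.empty).getD c 0) s]
  rw [PySem.List.foldl_congr_mem _ _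
    (fun s p => s + (if W.contains p.2 then (m : Int) - p.1 - 1 else 0)) s
    (by intro acc p _; by_cases h : p.2 ∈ W <;> simp [h])]
  rw [PySem.List.foldl_add]
  congr 1
  rw [pv_dict_sum _ _ (PySem.Set.nodup_ofList W) (fun p => (m : Int) - 1 - p.1)]
  have hz : ((PySem.Set.ofList W).map
      (fun c => (PySem.Dict.empty : PySem.Dict Int Int).getD c 0)).sum = 0 := by
    simp [PySem.Dict.getD_empty]
  rw [hz, zero_add]
  refine congrArg List.sum (List.map_congr_left ?_)
  intro p _
  by_cases h : p.2 ∈ W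
  · simp [h, PySem.Set.mem_ofList]; ring
  · simp [h, PySem.Set.mem_ofList]

lemma pv_head_eq (V : List (List Int)) (hV : V ≠ []) :
    PySem.List.pyGetD V 0 [] = V.headD [] := by
  cases V with
  | nil => exact absurd rfl hV
  | cons x xs => simp [PySem.List.pyGetD]

-- ===== VERDICT (by name: the statement is the Claim_ definition above) =====
theorem kborda_score_spec : Claim_equal_kborda_score := by
  intro V W _ hpre
  unfold Spec_kborda_score kborda_score kborda_score_alt
  rcases hpre with ⟨hV, hlen⟩
  rw [pv_head_eq V hV]
  apply PySem.List.foldl_congr_mem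
  intro s v hv
  exact pv_inner_eq W (V.headD []).length v (hlen v hv) s
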